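-- pv_equiv track=rewrite | github.com/doraemon1293/Leetcode | archive/822. Card Flipping Game.py | flipgame
-- ===== SOURCE A (Python) =====
-- def flipgame(fronts, backs):
--     """
--     :type fronts: List[int]
--     :type backs: List[int]
--     :rtype: int
--     """
--     not_allowed_numbers=set()
--     for i in range(len(fronts)):
--         if fronts[i]==backs[i]:
--             not_allowed_numbers.add(fronts[i])
--     ans=float("inf")
--     for i in range(len(fronts)):
--         if fronts[i] not in not_allowed_numbers:
--             ans=min(ans,fronts[i])
--         if backs[i] not in not_allowed_numbers:
--             ans=min(ans,backs[i])
--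
--     return ans if ans!=float("inf") else 0
-- ===== SOURCE B (Python) =====
-- def flipgame(fronts, backs):
--     forbidden = {f for f, b in zip(fronts, backs) if f == b}
--     for v in sorted({x for card in zip(fronts, backs) for x in card}):
--         if v not in forbidden:
--             return v
--     return 0
-- ===== Notes on version B (the rewrite author's own statement) =====
-- stated objective: alternative
-- what changed: Replaces A's index-driven running-min scan with two min-update branches by a sort-then-early-exit search: sort the distinct appearing values ascending and return the first one not in the forbidden set (0 if none).
import Mathlib
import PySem

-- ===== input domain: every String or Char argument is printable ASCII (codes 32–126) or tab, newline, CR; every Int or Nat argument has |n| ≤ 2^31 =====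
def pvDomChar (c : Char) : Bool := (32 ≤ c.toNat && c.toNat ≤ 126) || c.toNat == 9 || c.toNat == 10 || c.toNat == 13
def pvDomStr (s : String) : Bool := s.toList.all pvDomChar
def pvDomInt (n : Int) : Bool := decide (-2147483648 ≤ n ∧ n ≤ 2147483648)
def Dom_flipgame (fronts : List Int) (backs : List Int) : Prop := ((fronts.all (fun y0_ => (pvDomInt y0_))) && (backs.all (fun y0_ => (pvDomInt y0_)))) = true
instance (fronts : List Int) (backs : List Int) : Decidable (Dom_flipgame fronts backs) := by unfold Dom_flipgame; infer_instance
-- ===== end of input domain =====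

-- B replaces A's index-driven running-min scan by sorting the distinct appearing values and
-- returning the first one not in the forbidden set (sort-then-early-exit; not claimed faster).

-- ===== PORT A =====
-- ans = float("inf") is modelled as `none`; `min(ans, x)` on a real value is `some (min v x)`.
def flipgame (fronts : List Int) (backs : List Int) : Int :=
  let na : PySem.Set Int :=
    (PySem.List.pyRange 0 (PySem.List.len fronts) 1).foldl
      (fun s i =>
        if PySem.List.pyGetD fronts i 0 = PySem.List.pyGetD backs i 0 then
          PySem.Set.add s (PySem.List.pyGetD fronts i 0)
        else s)
      PySem.Set.empty
  let ans : Option Int :=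
    (PySem.List.pyRange 0 (PySem.List.len fronts) 1).foldl
      (fun a i =>
        let a :=
          if PySem.Set.contains na (PySem.List.pyGetD fronts i 0) then a
          else some (match a with
                     | none => PySem.List.pyGetD fronts i 0
                     | some v => min v (PySem.List.pyGetD fronts i 0))
        if PySem.Set.contains na (PySem.List.pyGetD backs i 0) then a
        else some (match a with
                   | none => PySem.List.pyGetD backs i 0
                   | some v => min v (PySem.List.pyGetD backs i 0)))
      none
  match ans with
  | some v => v
  | none => 0

-- ===== PORT B =====
def flipgame_alt (fronts : List Int) (backs : List Int) : Int :=
  let cards : List (Int × Int) := fronts.zip backs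
  let forbidden : PySem.Set Int :=
    cards.foldl
      (fun s p => if p.1 = p.2 then PySem.Set.add s p.1 else s)
      PySem.Set.empty
  let vals : List Int :=
    PySem.List.sorted (PySem.Set.ofList (cards.flatMap (fun card => [card.1, card.2])))
      (fun x => x) false
  -- the for-loop that returns at the first non-forbidden value is List.find?
  match vals.find? (fun v => ! PySem.Set.contains forbidden v) with
  | some v => v
  | none => 0

-- ===== PRECONDITION & SPEC =====
-- Pre_ excludes exactly the inputs where backs is shorter than fronts, on which A raises IndexError.
def Pre_flipgame (fronts : List Int) (backs : List Int) : Prop := fronts.length ≤ backs.length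
instance (fronts : List Int) (backs : List Int) : Decidable (Pre_flipgame fronts backs) := by unfold Pre_flipgame; infer_instance
def pvWitness_flipgame : List Int × List Int := ([1, 2, 4, 4, 7], [1, 3, 4, 1, 3])
def Spec_flipgame (fronts : List Int) (backs : List Int) (out : Int) : Prop := out = flipgame_alt fronts backs
instance (fronts : List Int) (backs : List Int) (out : Int) : Decidable (Spec_flipgame fronts backs out) := by unfold Spec_flipgame; infer_instance

-- ===== CLAIM (what is proved, stated in full; the proofs are below) =====
def Claim_equal_flipgame : Prop := ∀ (fronts : List Int) (backs : List Int), Dom_flipgame fronts backs → Pre_flipgame fronts backs → Spec_flipgame fronts backs (flipgame fronts backs)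

-- ===== LEMMAS AND PROOFS =====

-- one min-step on an Option Int accumulator (A's `ans = min(ans, x)` with inf = none)
def optMin (a : Option Int) (x : Int) : Option Int :=
  some (match a with | none => x | some v => min v x)

-- A's index loop re-expressed as a fold over the zipped list (lengths equal)
theorem foldA_zip {σ : Type} (fronts backs : List Int) (h : fronts.length ≤ backs.length)
    (g : σ → Int → Int → σ) (init : σ) :
    (PySem.List.pyRange 0 (PySem.List.len fronts) 1).foldl
      (fun s i => g s (PySem.List.pyGetD fronts i 0) (PySem.List.pyGetD backs i 0)) init
    = (fronts.zip backs).foldl (fun s p => g s p.1 p.2) init := by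
  have hlen : PySem.List.len fronts = PySem.List.len (fronts.zip backs) := by
    simp [PySem.List.len, List.length_zip, h]
  have h1 :
      (PySem.List.pyRange 0 (PySem.List.len fronts) 1).foldl
        (fun s i => g s (PySem.List.pyGetD fronts i 0) (PySem.List.pyGetD backs i 0)) init
      = (PySem.List.pyRange 0 (PySem.List.len (fronts.zip backs)) 1).foldl
        (fun s i => g s (PySem.List.pyGetD (fronts.zip backs) i (0, 0)).1
                        (PySem.List.pyGetD (fronts.zip backs) i (0, 0)).2) init := by
    rw [← hlen]
    apply PySem.List.foldl_congr_mem
    intro acc i hi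
    have hi' := (PySem.List.mem_pyRange_one (a := 0) (b := PySem.List.len fronts) (x := i)).1 hi
    have hub : i < (fronts.length : Int) := by simpa [PySem.List.len] using hi'.2
    obtain ⟨n, rfl⟩ : ∃ n : Nat, i = (n : Int) := ⟨i.toNat, (Int.toNat_of_nonneg hi'.1).symm⟩
    have hn : n < fronts.length := by exact_mod_cast hub
    have hnb : n < backs.length := by omega
    have hnz : n < (fronts.zip backs).length := by simp [List.length_zip]; omega
    simp [PySem.List.pyGetD_natCast, hn, hnb, List.getElem_zip]
  rw [h1, PySem.List.foldl_pyRange_pyGetD (fronts.zip backs) (0, 0)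
        (fun s p => g s p.1 p.2) init (le_refl 0)]
  simp

-- the two forbidden-set builds produce the same list
theorem na_eq (fronts backs : List Int) (h : fronts.length ≤ backs.length) :
    (PySem.List.pyRange 0 (PySem.List.len fronts) 1).foldl
      (fun s i =>
        if PySem.List.pyGetD fronts i 0 = PySem.List.pyGetD backs i 0 then
          PySem.Set.add s (PySem.List.pyGetD fronts i 0)
        else s)
      PySem.Set.empty
    = (fronts.zip backs).foldl
        (fun s p => if p.1 = p.2 then PySem.Set.add s p.1 else s) PySem.Set.empty :=
  foldA_zip fronts backs h (fun s f b => if f = b then PySem.Set.add s f else s) _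

-- A's min loop is optMin folded over the allowed values, in interleaved order
theorem foldl_step_eq (na : PySem.Set Int) (zs : List (Int × Int)) (a : Option Int) :
    zs.foldl
      (fun a p =>
        let a := if PySem.Set.contains na p.1 then a else optMin a p.1
        if PySem.Set.contains na p.2 then a else optMin a p.2) a
    = ((zs.flatMap (fun p => [p.1, p.2])).filter
        (fun x => ! PySem.Set.contains na x)).foldl optMin a := by
  induction zs generalizing a with
  | nil => rfl
  | cons p t ih =>
      rw [List.foldl_cons, List.flatMap_cons, List.filter_append, List.foldl_append, ih]
      congr 1
      by_cases h1 : p.1 ∈ na <;> by_cases h2 : p.2 ∈ na <;>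
        simp [h1, h2, optMin]

-- optMin folded from a real value is the running min
theorem foldl_optMin_some (l : List Int) (x : Int) :
    l.foldl optMin (some x) = some (l.foldl min x) := by
  induction l generalizing x with
  | nil => rfl
  | cons y t ih => simp [optMin, ih]

-- optMin folded from none is Python's min? of the list
theorem foldl_optMin_none (l : List Int) :
    l.foldl optMin none = PySem.List.min? l (fun x => x) := by
  cases l with
  | nil => rfl
  | cons x t => rw [PySem.List.min?_id_cons]; simp [optMin, foldl_optMin_some]

-- A's whole second loop, literal body, equals min? of the allowed interleaved values
theorem ansA (fronts backs : List Int) (h : fronts.length ≤ backs.length) (na : PySem.Set Int) :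
    (PySem.List.pyRange 0 (PySem.List.len fronts) 1).foldl
      (fun a i =>
        let a :=
          if PySem.Set.contains na (PySem.List.pyGetD fronts i 0) then a
          else some (match a with
                     | none => PySem.List.pyGetD fronts i 0
                     | some v => min v (PySem.List.pyGetD fronts i 0))
        if PySem.Set.contains na (PySem.List.pyGetD backs i 0) then a
        else some (match a with
                   | none => PySem.List.pyGetD backs i 0
                   | some v => min v (PySem.List.pyGetD backs i 0)))
      none
    = PySem.List.min?
        (((fronts.zip backs).flatMap (fun p => [p.1, p.2])).filter
          (fun x => ! PySem.Set.contains na x)) (fun x => x) := by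
  rw [foldA_zip fronts backs h
        (fun (a : Option Int) f b =>
          let a := if PySem.Set.contains na f then a
                   else some (match a with | none => f | some v => min v f)
          if PySem.Set.contains na b then a
          else some (match a with | none => b | some v => min v b)) none]
  exact (foldl_step_eq na _ none).trans (foldl_optMin_none _)

-- min? (no key) depends only on which values occur
theorem min?_congr_mem (l₁ l₂ : List Int) (h : ∀ x, x ∈ l₁ ↔ x ∈ l₂) :
    PySem.List.min? l₁ (fun x => x) = PySem.List.min? l₂ (fun x => x) := by
  cases e1 : PySem.List.min? l₁ (fun x => x) with
  | none =>
      have h1 : l₁ = [] := (PySem.List.min?_eq_none_iff _ _).1 e1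
      have h2 : l₂ = [] := by
        cases l₂ with
        | nil => rfl
        | cons y t =>
            have hy : y ∈ l₁ := (h y).2 (by simp)
            rw [h1] at hy
            cases hy
      rw [(PySem.List.min?_eq_none_iff l₂ (fun x => x)).2 h2]
  | some m =>
      cases e2 : PySem.List.min? l₂ (fun x => x) with
      | none =>
          have h2 : l₂ = [] := (PySem.List.min?_eq_none_iff _ _).1 e2
          have hm : m ∈ l₁ := PySem.List.min?_mem e1
          rw [h2] at h
          cases (h m).1 hm
      | some m' =>
          have hm : m ∈ l₁ := PySem.List.min?_mem e1
          have hm' : m' ∈ l₂ := PySem.List.min?_mem e2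
          have le1 : m ≤ m' := PySem.List.min?_isMin e1 m' ((h m').2 hm')
          have le2 : m' ≤ m := PySem.List.min?_isMin e2 m ((h m).1 hm)
          exact congrArg some (le_antisymm le1 le2)

-- folding min from x over a list of elements ≥ x leaves x
theorem foldl_min_of_le (x : Int) (l : List Int) (h : ∀ y ∈ l, x ≤ y) :
    l.foldl min x = x := by
  induction l generalizing x with
  | nil => rfl
  | cons z zs ih =>
      simp only [List.foldl_cons, min_eq_left (h z (by simp))]
      exact ih x (fun y hy => h y (by simp [hy]))

-- on an ascending list, the first element satisfying p is the minimum of the p-filtered list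
theorem find?_sorted_eq_min?_filter (l : List Int) (p : Int → Bool)
    (hs : l.Pairwise (· ≤ ·)) :
    l.find? p = PySem.List.min? (l.filter p) (fun x => x) := by
  induction l with
  | nil => rfl
  | cons x t ih =>
      have hx : ∀ y ∈ t, x ≤ y := fun y hy => (List.pairwise_cons.1 hs).1 y hy
      have ht : t.Pairwise (· ≤ ·) := (List.pairwise_cons.1 hs).2
      by_cases hpx : p x = true
      · rw [List.find?_cons_of_pos hpx, List.filter_cons_of_pos hpx,
          PySem.List.min?_id_cons]
        rw [foldl_min_of_le x (t.filter p)
          (fun y hy => hx y (List.mem_of_mem_filter hy))]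
      · rw [List.find?_cons_of_neg (by simpa using hpx),
          List.filter_cons_of_neg (by simpa using hpx)]
        exact ih ht

-- membership in the interleaved allowed list vs. in the filtered sorted distinct values
theorem mem_allowed_iff (cards : List (Int × Int)) (na : PySem.Set Int) (x : Int) :
    (x ∈ (cards.flatMap (fun p => [p.1, p.2])).filter (fun y => ! PySem.Set.contains na y))
    ↔ (x ∈ (PySem.List.sorted (PySem.Set.ofList (cards.flatMap (fun card => [card.1, card.2])))
          (fun x => x) false).filter (fun y => ! PySem.Set.contains na y)) := by
  simp only [List.mem_filter, PySem.List.mem_sorted, PySem.Set.mem_ofList]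

-- ===== VERDICT (by name: the statement is the Claim_ definition above) =====
theorem flipgame_spec : Claim_equal_flipgame := by
  intro fronts backs _ hpre
  unfold Spec_flipgame flipgame flipgame_alt
  dsimp only
  rw [na_eq fronts backs hpre, ansA fronts backs hpre,
    min?_congr_mem _ _ (mem_allowed_iff (fronts.zip backs) _),
    ← find?_sorted_eq_min?_filter _ _
        ((PySem.List.sorted_ofList_pairwise_lt _).imp (fun h => le_of_lt h))]
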